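-- pv_equiv track=rewrite | github.com/gridvisi/Python_workspace | 1 student_code/zero2one_testing/6 kyu Weigh The List 1.py | weigh_the_list
-- ===== SOURCE A (Python) =====
-- def weigh_the_list(a):
--     numEntries = len(a)
--     Weights = []
--     # Make sure that their sum is zero pairwise
--     # For example, make sure that first and second elements summed are zero, then third and forth, etc
--     for i in range(int(numEntries/2)):
--         A = a[2*i]
--         B = a[2*i+1]
--         Weights.append(B)
--         Weights.append(-A)
--     return Weights
-- ===== SOURCE B (Python) =====
-- def weigh_the_list(a):
--     # Staged passes: pull the two strided slices out first, negate the even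
--     # slice wholesale, then interleave odds-then-negated-evens. zip truncates
--     # to len(odds) = n//2 pairs, so a trailing unpaired element is dropped.
--     evens = a[0::2]
--     odds = a[1::2]
--     neg = [-x for x in evens]
--     return [v for pair in zip(odds, neg) for v in pair]
-- ===== Notes on version B (the rewrite author's own statement) =====
-- stated objective: alternative
-- what changed: Replaces the index loop with indexed pair reads and appends by staged whole-list passes: extract the two strided slices a[0::2] and a[1::2] up front, negate the even slice wholesale, then interleave the odd slice with the negated evens (zip truncating to n//2 pairs).
import Mathlib
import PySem

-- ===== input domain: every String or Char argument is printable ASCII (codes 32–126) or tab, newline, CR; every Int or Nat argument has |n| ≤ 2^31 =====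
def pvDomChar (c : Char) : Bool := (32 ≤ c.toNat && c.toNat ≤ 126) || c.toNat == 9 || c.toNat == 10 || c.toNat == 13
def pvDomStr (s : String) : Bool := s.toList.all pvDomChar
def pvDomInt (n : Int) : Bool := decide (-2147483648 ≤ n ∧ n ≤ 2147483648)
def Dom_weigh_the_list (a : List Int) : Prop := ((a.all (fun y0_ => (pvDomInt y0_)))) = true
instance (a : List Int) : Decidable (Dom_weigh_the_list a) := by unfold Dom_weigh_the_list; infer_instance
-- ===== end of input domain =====

-- B replaces the index loop by staged passes: two strided slices a[0::2]/a[1::2] extracted up front, the even slice negated wholesale, then interleaved; same result.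


-- ===== PORT A =====
def weigh_the_list (a : List Int) : List Int :=
  -- numEntries = len(a); int(numEntries/2) = numEntries // 2 since len(a) ≥ 0 (exact float division of a length)
  let numEntries : Int := a.length
  (PySem.List.pyRange 0 (PySem.Int.floordiv numEntries 2) 1).foldl
    (fun Weights i =>
      let A := PySem.List.pyGetD a (2 * i) 0       -- a[2*i], always in range for i < n//2
      let B := PySem.List.pyGetD a (2 * i + 1) 0   -- a[2*i+1], always in range
      (Weights ++ [B]) ++ [-A]) []

-- ===== PORT B =====
-- xs[0::2], hand port of the step-2 slice (exact: every second element starting at index 0)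
def pvStride2 : List Int → List Int
  | [] => []
  | [x] => [x]
  | x :: _ :: t => x :: pvStride2 t

def weigh_the_list_alt (a : List Int) : List Int :=
  let evens := pvStride2 a            -- a[0::2]
  let odds := pvStride2 (a.drop 1)    -- a[1::2] = (a dropped one)[0::2]
  let neg := evens.map (fun x => -x)
  (odds.zip neg).flatMap (fun p => [p.1, p.2])

-- ===== PRECONDITION & SPEC =====
def Spec_weigh_the_list (a : List Int) (out : List Int) : Prop := out = weigh_the_list_alt a
instance (a : List Int) (out : List Int) : Decidable (Spec_weigh_the_list a out) := by unfold Spec_weigh_the_list; infer_instance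

-- ===== CLAIM =====
def Claim_equal_weigh_the_list : Prop := ∀ (a : List Int), Dom_weigh_the_list a → Spec_weigh_the_list a (weigh_the_list a)

-- ===== LEMMAS AND PROOFS =====
theorem weigh_the_list_eq_flatMap (a : List Int) :
    weigh_the_list a =
      (List.range (a.length / 2)).flatMap
        (fun k => [a.getD (2 * k + 1) 0, -(a.getD (2 * k) 0)]) := by
  unfold weigh_the_list
  have h : PySem.Int.floordiv (a.length : Int) 2 = ((a.length / 2 : Nat) : Int) :=
    PySem.Int.floordiv_natCast a.length 2
  simp only [h, PySem.List.pyRange_zero_natCast, List.foldl_map]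
  have hfold := PySem.List.foldl_append_eq_flatMap
    (fun k : Nat => [PySem.List.pyGetD a (2 * (k : Int) + 1) 0, -PySem.List.pyGetD a (2 * (k : Int)) 0])
    (List.range (a.length / 2)) []
  simp only [List.append_assoc, List.singleton_append]
  simp only [] at hfold
  rw [hfold]
  simp only [List.nil_append]
  congr 1
  funext k
  have h1 : (2 * (k : Int) + 1) = ((2 * k + 1 : Nat) : Int) := by push_cast; ring
  have h2 : (2 * (k : Int)) = ((2 * k : Nat) : Int) := by push_cast; ring
  rw [h1, h2, PySem.List.pyGetD_natCast, PySem.List.pyGetD_natCast]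

theorem pvStride2_cons (y : Int) (t : List Int) :
    pvStride2 (y :: t) = y :: pvStride2 (t.drop 1) := by
  match t with
  | [] => simp [pvStride2]
  | z :: t' => simp [pvStride2]

theorem alt_cons_cons (x y : Int) (t : List Int) :
    weigh_the_list_alt (x :: y :: t) = y :: -x :: weigh_the_list_alt t := by
  unfold weigh_the_list_alt
  simp only [pvStride2, List.drop_succ_cons, List.drop_zero, pvStride2_cons y t,
    List.map_cons, List.zip_cons_cons, List.flatMap_cons]
  rfl

theorem flatMap_range_eq_alt (a : List Int) :
    (List.range (a.length / 2)).flatMap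
        (fun k => [a.getD (2 * k + 1) 0, -(a.getD (2 * k) 0)]) =
      weigh_the_list_alt a := by
  match a with
  | [] => simp [weigh_the_list_alt, pvStride2]
  | [x] => simp [weigh_the_list_alt, pvStride2]
  | x :: y :: t =>
    have hl : (x :: y :: t).length / 2 = t.length / 2 + 1 := by
      simp [List.length_cons]; omega
    rw [hl, List.range_succ_eq_map]
    simp only [List.flatMap_cons, List.flatMap_map]
    have hsh : (fun k : Nat => [(x :: y :: t).getD (2 * Nat.succ k + 1) 0,
              -((x :: y :: t).getD (2 * Nat.succ k) 0)]) =
           (fun k : Nat => [t.getD (2 * k + 1) 0, -(t.getD (2 * k) 0)]) := by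
      funext k
      have e1 : 2 * Nat.succ k + 1 = (2 * k + 1) + 1 + 1 := by omega
      have e2 : 2 * Nat.succ k = (2 * k) + 1 + 1 := by omega
      rw [e1, e2]
      simp
    have ih := flatMap_range_eq_alt t
    rw [hsh, ih, alt_cons_cons]
    simp

-- ===== VERDICT =====
theorem weigh_the_list_spec : Claim_equal_weigh_the_list := by
  intro a _
  unfold Spec_weigh_the_list
  rw [weigh_the_list_eq_flatMap, flatMap_range_eq_alt]
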